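-- pv_equiv track=rewrite | github.com/aditya7iyengar/py_practice | codewars/katas/3_kyu/conways_game_of_life.py | convert_set_to_table
-- ===== SOURCE A (Python) =====
-- def convert_set_to_table(s):
--
--   if not set:
--     mi = mj = ni = nj = 0
--   else:
--     mi = min(map(lambda x: x[0], s))
--     mj = min(map(lambda x: x[1], s))
--     ni = max(map(lambda x: x[0], s))
--     nj = max(map(lambda x: x[1], s))
--
--   table = [[0 for j in range(nj-mj+1)] for i in range(ni-mi+1)]
--
--   for (i,j) in s:
--     table[i-mi][j-mj] = 1
--
--   return table
--
--   from itertools import product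
-- ===== SOURCE B (Python) =====
-- def convert_set_to_table(s):
--     mi = min(x[0] for x in s)
--     mj = min(x[1] for x in s)
--     ni = max(x[0] for x in s)
--     nj = max(x[1] for x in s)
--     return [[1 if (mi + i, mj + j) in s else 0 for j in range(nj - mj + 1)]
--             for i in range(ni - mi + 1)]
-- ===== Notes on version B (the rewrite author's own statement) =====
-- stated objective: idiomatic
-- what changed: B builds the grid directly in a nested comprehension, deciding each cell by a membership query against the set, instead of allocating a zero grid and scattering 1s by looping over the live cells.
import Mathlib
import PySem

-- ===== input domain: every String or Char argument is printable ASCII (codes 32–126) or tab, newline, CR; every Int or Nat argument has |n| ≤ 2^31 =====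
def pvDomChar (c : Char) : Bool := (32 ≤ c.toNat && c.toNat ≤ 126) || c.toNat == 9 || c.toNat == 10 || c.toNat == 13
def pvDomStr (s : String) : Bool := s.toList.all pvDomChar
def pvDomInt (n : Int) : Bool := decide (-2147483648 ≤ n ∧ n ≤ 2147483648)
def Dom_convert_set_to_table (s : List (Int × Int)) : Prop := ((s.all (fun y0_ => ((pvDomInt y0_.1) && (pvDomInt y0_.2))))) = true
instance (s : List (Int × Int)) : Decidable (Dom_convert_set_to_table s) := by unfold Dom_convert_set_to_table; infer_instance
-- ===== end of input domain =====

-- B builds each cell of the bounding-box grid by a membership query against the set,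
-- instead of A's zero grid updated by scattering 1s over the live cells (objective: idiomatic).

-- ===== PORT A =====
-- 'table[i][j] = 1'; exact for 0 ≤ i, j — in A the indices i - mi, j - mj are
-- always nonnegative and in range since mi, mj are the minima and ni, nj the maxima.
def pySetCell (t : List (List Int)) (i j : Int) : List (List Int) :=
  t.modify i.toNat (fun row => row.set j.toNat 1)

def convert_set_to_table (s : List (Int × Int)) : List (List Int) :=
  -- 'if not set' is always False ('set' is the builtin), so Python always takes the min/max branch;
  -- min/max raise ValueError on an empty s (excluded by Pre_), the 'none' arm below.
  match PySem.List.min? (s.map (fun x => x.1)) (fun y => y),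
        PySem.List.min? (s.map (fun x => x.2)) (fun y => y),
        PySem.List.max? (s.map (fun x => x.1)) (fun y => y),
        PySem.List.max? (s.map (fun x => x.2)) (fun y => y) with
  | some mi, some mj, some ni, some nj =>
      let table := (PySem.List.pyRange 0 (ni - mi + 1)).map (fun _ =>
        (PySem.List.pyRange 0 (nj - mj + 1)).map (fun _ => (0 : Int)))
      s.foldl (fun t p => pySetCell t (p.1 - mi) (p.2 - mj)) table
  | _, _, _, _ => []

-- ===== PORT B =====
def convert_set_to_table_alt (s : List (Int × Int)) : List (List Int) :=
  -- the four min/max calls, sequenced with Option.bind (none = the ValueError on empty s)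
  (((PySem.List.min? (s.map (fun x => x.1)) (fun y => y)).bind (fun mi =>
    (PySem.List.min? (s.map (fun x => x.2)) (fun y => y)).bind (fun mj =>
    (PySem.List.max? (s.map (fun x => x.1)) (fun y => y)).bind (fun ni =>
    (PySem.List.max? (s.map (fun x => x.2)) (fun y => y)).map (fun nj =>
      (PySem.List.pyRange 0 (ni - mi + 1)).map (fun i =>
        (PySem.List.pyRange 0 (nj - mj + 1)).map (fun j =>
          if (mi + i, mj + j) ∈ s then (1 : Int) else 0)))))))).getD []

-- ===== PRECONDITION & SPEC =====
-- Pre_ excludes only the empty set, on which A (and B) raise ValueError from min().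
def Pre_convert_set_to_table (s : List (Int × Int)) : Prop := s ≠ []
instance (s : List (Int × Int)) : Decidable (Pre_convert_set_to_table s) := by unfold Pre_convert_set_to_table; infer_instance
def pvWitness_convert_set_to_table : (List (Int × Int)) := [(0, 0), (1, 2)]

def Spec_convert_set_to_table (s : List (Int × Int)) (out : List (List Int)) : Prop := out = convert_set_to_table_alt s
instance (s : List (Int × Int)) (out : List (List Int)) : Decidable (Spec_convert_set_to_table s out) := by unfold Spec_convert_set_to_table; infer_instance

-- ===== CLAIM (what is proved, stated in full; the proofs are below) =====
def Claim_equal_convert_set_to_table : Prop := ∀ (s : List (Int × Int)), Dom_convert_set_to_table s → Pre_convert_set_to_table s → Spec_convert_set_to_table s (convert_set_to_table s)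

-- ===== LEMMAS AND PROOFS =====

-- the bounding-box grid filled by a cell function
def gridF (mi mj ni nj : Int) (f : Int → Int → Int) : List (List Int) :=
  (PySem.List.pyRange 0 (ni - mi + 1)).map (fun i =>
    (PySem.List.pyRange 0 (nj - mj + 1)).map (fun j => f i j))

theorem gridF_congr (mi mj ni nj : Int) {f g : Int → Int → Int}
    (h : ∀ i j, f i j = g i j) : gridF mi mj ni nj f = gridF mi mj ni nj g := by
  unfold gridF
  exact List.map_congr_left (fun i _ => List.map_congr_left (fun j _ => h i j))

theorem pySetCell_gridF (mi mj ni nj a b : Int)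
    (ha : mi ≤ a) (ha' : a ≤ ni) (hb : mj ≤ b) (hb' : b ≤ nj) (f : Int → Int → Int) :
    pySetCell (gridF mi mj ni nj f) (a - mi) (b - mj)
      = gridF mi mj ni nj (fun i j => if i = a - mi ∧ j = b - mj then 1 else f i j) := by
  unfold gridF pySetCell
  have hR : ni - mi + 1 = ((ni - mi + 1).toNat : Int) := by omega
  have hC : nj - mj + 1 = ((nj - mj + 1).toNat : Int) := by omega
  rw [hR, hC, PySem.List.pyRange_zero_natCast, PySem.List.pyRange_zero_natCast]
  apply List.ext_getElem
  · simp
  intro r h1 h2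
  simp only [List.length_modify, List.length_map, List.length_range] at h1
  rw [List.getElem_modify]
  simp only [List.getElem_map, List.getElem_range]
  by_cases hr : (a - mi).toNat = r
  · simp only [hr, ite_true]
    apply List.ext_getElem
    · simp
    intro c h3 h4
    simp only [List.length_set] at h3
    rw [List.getElem_set]
    simp only [List.getElem_map, List.getElem_range]
    have hri : (r : Int) = a - mi := by omega
    by_cases hc : (b - mj).toNat = c
    · have : (c : Int) = b - mj := by omega
      simp [this, hri, hc]
    · have : ¬ ((c : Int) = b - mj) := by omega
      simp [this, hc]
  · have : ¬ ((r : Int) = a - mi) := by omega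
    simp [this, hr]

theorem fold_gridF (mi mj ni nj : Int) (l : List (Int × Int))
    (hb : ∀ p ∈ l, mi ≤ p.1 ∧ p.1 ≤ ni ∧ mj ≤ p.2 ∧ p.2 ≤ nj) (f : Int → Int → Int) :
    l.foldl (fun t p => pySetCell t (p.1 - mi) (p.2 - mj)) (gridF mi mj ni nj f)
      = gridF mi mj ni nj (fun i j => if (mi + i, mj + j) ∈ l then 1 else f i j) := by
  induction l generalizing f with
  | nil => simp
  | cons a l ih =>
    obtain ⟨h1, h2, h3, h4⟩ := hb a (List.mem_cons_self)
    simp only [List.foldl_cons]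
    rw [pySetCell_gridF mi mj ni nj a.1 a.2 h1 h2 h3 h4 f,
        ih (fun p hp => hb p (List.mem_cons_of_mem a hp))]
    apply gridF_congr
    intro i j
    by_cases hmem : (mi + i, mj + j) ∈ l
    · simp [hmem]
    · by_cases heq : (mi + i, mj + j) = a
      · have hi : i = a.1 - mi := by
          have := congrArg Prod.fst heq; simp at this; omega
        have hj : j = a.2 - mj := by
          have := congrArg Prod.snd heq; simp at this; omega
        simp [hi, hj]
      · have hne : ¬ (i = a.1 - mi ∧ j = a.2 - mj) := by
          rintro ⟨hi, hj⟩
          exact heq (by rw [Prod.ext_iff]; exact ⟨by simpa using (by omega : mi + i = a.1), by simpa using (by omega : mj + j = a.2)⟩)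
        have hmem' : ¬ (mi + i, mj + j) ∈ a :: l := by simp [hmem, heq]
        simp [hmem, hmem', hne]

-- ===== VERDICT (by name: the statement is the Claim_ definition above) =====
theorem convert_set_to_table_spec : Claim_equal_convert_set_to_table := by
  intro s _ hpre
  unfold Spec_convert_set_to_table convert_set_to_table convert_set_to_table_alt
  have hne1 : s.map (fun x : Int × Int => x.1) ≠ [] := by
    simpa using hpre
  have hne2 : s.map (fun x : Int × Int => x.2) ≠ [] := by
    simpa using hpre
  rcases h1 : PySem.List.min? (s.map (fun x => x.1)) (fun y => y) with _ | mi
  · exact absurd ((PySem.List.min?_eq_none_iff _ _).1 h1) hne1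
  rcases h2 : PySem.List.min? (s.map (fun x => x.2)) (fun y => y) with _ | mj
  · exact absurd ((PySem.List.min?_eq_none_iff _ _).1 h2) hne2
  rcases h3 : PySem.List.max? (s.map (fun x => x.1)) (fun y => y) with _ | ni
  · exact absurd ((PySem.List.max?_eq_none_iff _ _).1 h3) hne1
  rcases h4 : PySem.List.max? (s.map (fun x => x.2)) (fun y => y) with _ | nj
  · exact absurd ((PySem.List.max?_eq_none_iff _ _).1 h4) hne2
  simp only [h1, h2, h3, h4]
  have hbnd : ∀ p ∈ s, mi ≤ p.1 ∧ p.1 ≤ ni ∧ mj ≤ p.2 ∧ p.2 ≤ nj := by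
    intro p hp
    exact ⟨PySem.List.min?_isMin h1 p.1 (List.mem_map_of_mem hp),
           PySem.List.max?_isMax h3 p.1 (List.mem_map_of_mem hp),
           PySem.List.min?_isMin h2 p.2 (List.mem_map_of_mem hp),
           PySem.List.max?_isMax h4 p.2 (List.mem_map_of_mem hp)⟩
  simpa [gridF] using fold_gridF mi mj ni nj s hbnd (fun _ _ => 0)
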